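-- pv_equiv track=rewrite | github.com/AJBats/saturn-daytona-cce-re | workstreams/driving_model/merge_cdl.py | scan_function
-- ===== SOURCE A (Python) =====
-- F_CODE  = 0x01
--
-- F_READ  = 0x02
--
-- F_WRITE = 0x04
--
-- def scan_function(cdl_data, link_addr, size, load_offset):
--     """Count code/read/write bytes for one function in CDL bitmap."""
--     cdl_start = (link_addr - 0x06000000) + load_offset
--     code = read = write = 0
--     for i in range(size):
--         b = cdl_data[cdl_start + i]
--         if b & F_CODE:
--             code += 1
--         if b & F_READ:
--             read += 1
--         if b & F_WRITE:
--             write += 1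
--     return code, read, write
-- ===== SOURCE B (Python) =====
-- F_CODE  = 0x01
--
-- F_READ  = 0x02
--
-- F_WRITE = 0x04
--
-- def scan_function(cdl_data, link_addr, size, load_offset):
--     """Count code/read/write bytes for one function in CDL bitmap."""
--     cdl_start = (link_addr - 0x06000000) + load_offset
--     code  = sum(1 for i in range(size) if cdl_data[cdl_start + i] & F_CODE)
--     read  = sum(1 for i in range(size) if cdl_data[cdl_start + i] & F_READ)
--     write = sum(1 for i in range(size) if cdl_data[cdl_start + i] & F_WRITE)
--     return code, read, write
-- ===== Notes on version B (the rewrite author's own statement) =====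
-- stated objective: alternative
-- what changed: Replaces the single fused loop maintaining three counters with three independent counting passes (one sum per flag) over the same index range.
import Mathlib
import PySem

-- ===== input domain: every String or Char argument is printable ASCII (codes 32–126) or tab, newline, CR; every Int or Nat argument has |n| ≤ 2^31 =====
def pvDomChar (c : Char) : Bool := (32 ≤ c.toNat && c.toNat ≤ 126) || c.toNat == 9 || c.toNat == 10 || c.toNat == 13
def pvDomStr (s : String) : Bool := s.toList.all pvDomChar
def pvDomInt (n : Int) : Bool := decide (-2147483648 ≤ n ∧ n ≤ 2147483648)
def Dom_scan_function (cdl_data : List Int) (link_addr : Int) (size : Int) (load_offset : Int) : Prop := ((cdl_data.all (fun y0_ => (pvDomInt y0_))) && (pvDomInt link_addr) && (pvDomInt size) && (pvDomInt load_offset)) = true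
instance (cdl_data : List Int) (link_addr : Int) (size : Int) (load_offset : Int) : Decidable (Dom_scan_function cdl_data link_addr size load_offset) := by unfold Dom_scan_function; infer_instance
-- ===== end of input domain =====

-- B replaces A's single fused loop (three counters in one pass) with three independent
-- single-flag counting passes over the same index range; same cost, different structure.

-- ===== PORT A =====
-- one fused pass: state (code, read, write), indexing via Python semantics (getD 0 is
-- unreachable under Pre_, where every index is in range)
def scan_function (cdl_data : List Int) (link_addr : Int) (size : Int) (load_offset : Int) : Int × Int × Int :=
  let cdl_start := (link_addr - 0x06000000) + load_offset
  (PySem.List.pyRange 0 size 1).foldl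
    (fun (st : Int × Int × Int) i =>
      let b := (PySem.List.pyGet? cdl_data (cdl_start + i)).getD 0
      let code := if PySem.Int.band b 1 ≠ 0 then st.1 + 1 else st.1
      let read := if PySem.Int.band b 2 ≠ 0 then st.2.1 + 1 else st.2.1
      let write := if PySem.Int.band b 4 ≠ 0 then st.2.2 + 1 else st.2.2
      (code, read, write))
    (0, 0, 0)

-- ===== PORT B =====
-- one counting pass for a single flag: sum(1 for i in range(size) if cdl_data[cdl_start+i] & flag)
def pvCountFlag (cdl_data : List Int) (cdl_start : Int) (size : Int) (flag : Int) : Int :=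
  (PySem.List.pyRange 0 size 1).foldl
    (fun acc i =>
      if PySem.Int.band ((PySem.List.pyGet? cdl_data (cdl_start + i)).getD 0) flag ≠ 0 then acc + 1 else acc)
    0

def scan_function_alt (cdl_data : List Int) (link_addr : Int) (size : Int) (load_offset : Int) : Int × Int × Int :=
  let cdl_start := (link_addr - 0x06000000) + load_offset
  (pvCountFlag cdl_data cdl_start size 1,
   pvCountFlag cdl_data cdl_start size 2,
   pvCountFlag cdl_data cdl_start size 4)

-- ===== PRECONDITION & SPEC =====
-- Pre_ excludes exactly the inputs where Python A raises IndexError: some scanned index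
-- cdl_start + i falls outside Python's (negative-wrapping) valid range of cdl_data.
def Pre_scan_function (cdl_data : List Int) (link_addr : Int) (size : Int) (load_offset : Int) : Prop :=
  size ≤ 0 ∨
    (-(cdl_data.length : Int) ≤ (link_addr - 0x06000000) + load_offset ∧
      (link_addr - 0x06000000) + load_offset + size ≤ (cdl_data.length : Int))
instance (cdl_data : List Int) (link_addr : Int) (size : Int) (load_offset : Int) : Decidable (Pre_scan_function cdl_data link_addr size load_offset) := by unfold Pre_scan_function; infer_instance

def pvWitness_scan_function : List Int × Int × Int × Int := ([1, 3, 7, 0], 0x06000001, 3, -1)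

def Spec_scan_function (cdl_data : List Int) (link_addr : Int) (size : Int) (load_offset : Int) (out : Int × Int × Int) : Prop := out = scan_function_alt cdl_data link_addr size load_offset
instance (cdl_data : List Int) (link_addr : Int) (size : Int) (load_offset : Int) (out : Int × Int × Int) : Decidable (Spec_scan_function cdl_data link_addr size load_offset out) := by unfold Spec_scan_function; infer_instance

-- ===== CLAIM (what is proved, stated in full; the proofs are below) =====
def Claim_equal_scan_function : Prop := ∀ (cdl_data : List Int) (link_addr : Int) (size : Int) (load_offset : Int), Dom_scan_function cdl_data link_addr size load_offset → Pre_scan_function cdl_data link_addr size load_offset → Spec_scan_function cdl_data link_addr size load_offset (scan_function cdl_data link_addr size load_offset)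

-- ===== LEMMAS AND PROOFS =====

-- the fused fold is the triple of the three single-flag folds, for any index list
theorem pv_fused_eq (cdl_data : List Int) (s : Int) :
    ∀ (l : List Int) (c r w : Int),
      l.foldl
        (fun (st : Int × Int × Int) i =>
          let b := (PySem.List.pyGet? cdl_data (s + i)).getD 0
          let code := if PySem.Int.band b 1 ≠ 0 then st.1 + 1 else st.1
          let read := if PySem.Int.band b 2 ≠ 0 then st.2.1 + 1 else st.2.1
          let write := if PySem.Int.band b 4 ≠ 0 then st.2.2 + 1 else st.2.2
          (code, read, write))
        (c, r, w)
      =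
      (l.foldl (fun acc i => if PySem.Int.band ((PySem.List.pyGet? cdl_data (s + i)).getD 0) 1 ≠ 0 then acc + 1 else acc) c,
       l.foldl (fun acc i => if PySem.Int.band ((PySem.List.pyGet? cdl_data (s + i)).getD 0) 2 ≠ 0 then acc + 1 else acc) r,
       l.foldl (fun acc i => if PySem.Int.band ((PySem.List.pyGet? cdl_data (s + i)).getD 0) 4 ≠ 0 then acc + 1 else acc) w) := by
  intro l
  induction l with
  | nil => intro c r w; simp [List.foldl]
  | cons x xs ih =>
      intro c r w
      simp only [List.foldl]
      rw [ih]

-- ===== VERDICT (by name: the statement is the Claim_ definition above) =====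
theorem scan_function_spec : Claim_equal_scan_function := by
  intro cdl_data link_addr size load_offset _ _
  unfold Spec_scan_function scan_function scan_function_alt pvCountFlag
  exact pv_fused_eq cdl_data _ _ 0 0 0
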